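-- pv_equiv track=rewrite | github.com/goggle1/db_test | virtual_client_src/data.py | total_client_error
-- ===== SOURCE A (Python) =====
-- def total_client_error(client_list):
--     '''total one clietn error number
--     '''
--     error_num_list = [0, 0, 0]
--     for every_channel_error in client_list:
--         for every_error in every_channel_error:
--             every_error_list = every_error.split(r';')
--             error_len = len(every_error_list)
--             if error_len == 1 or error_len == 2:
--                 error_num_list[0] += 1
--             elif error_len == 3:
--                 error_num_list[1] += 1
--             elif error_len == 4 or error_len == 5:
--                 error_num_list[2] += 1
--     return  error_num_list
-- ===== SOURCE B (Python) =====
-- def total_client_error(client_list):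
--     '''total one client error number'''
--     errors = [e for ch in client_list for e in ch]
--     return [sum(1 for e in errors if len(e.split(';')) in lens)
--             for lens in ((1, 2), (3,), (4, 5))]
-- ===== Notes on version B (the rewrite author's own statement) =====
-- stated objective: alternative
-- what changed: Replaces the single branch-and-mutate pass over a 3-slot accumulator with a staged decomposition: flatten the nested list once, then run three independent counting passes, one per bucket specification (1,2)/(3,)/(4,5), assembling the result by a comprehension over the bucket specs.
import Mathlib
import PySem

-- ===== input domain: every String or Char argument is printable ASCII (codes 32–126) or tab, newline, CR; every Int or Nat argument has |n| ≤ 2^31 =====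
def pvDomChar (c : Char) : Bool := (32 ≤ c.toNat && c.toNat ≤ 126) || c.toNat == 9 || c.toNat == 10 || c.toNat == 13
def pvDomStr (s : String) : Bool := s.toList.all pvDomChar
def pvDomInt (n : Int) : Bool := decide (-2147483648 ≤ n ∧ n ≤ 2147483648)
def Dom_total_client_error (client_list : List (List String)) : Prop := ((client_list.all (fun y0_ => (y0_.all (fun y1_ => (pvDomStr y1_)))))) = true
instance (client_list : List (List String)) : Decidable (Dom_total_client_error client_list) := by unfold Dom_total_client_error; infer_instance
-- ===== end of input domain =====

-- B: staged decomposition — flatten the nested list once, then three independent counting passes, one per bucket spec (alternative decomposition, same O(n) cost).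


-- ===== PORT A =====
-- len(every_error.split(';')) — split with the non-empty separator ';' always succeeds, so split? returns some
def pvSplitLenA (e : String) : Int :=
  (((PySem.Str.split? e ";").getD []).length : Int)

-- one step of A's inner loop body: branch on the length and bump one slot of the 3-list
def pvStepA (s : List Int) (e : String) : List Int :=
  let error_len := pvSplitLenA e
  if error_len = 1 ∨ error_len = 2 then s.set 0 (s.getD 0 0 + 1)
  else if error_len = 3 then s.set 1 (s.getD 1 0 + 1)
  else if error_len = 4 ∨ error_len = 5 then s.set 2 (s.getD 2 0 + 1)
  else s

def total_client_error (client_list : List (List String)) : List Int :=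
  client_list.foldl (fun acc every_channel_error => every_channel_error.foldl pvStepA acc) [0, 0, 0]

-- ===== PORT B =====
def pvSplitLenB (e : String) : Int :=
  (((PySem.Str.split? e ";").getD []).length : Int)

-- sum(1 for e in errors if len(e.split(';')) in lens)
def pvBucketSum (errors : List String) (lens : List Int) : Int :=
  errors.foldl (fun acc e => if pvSplitLenB e ∈ lens then acc + 1 else acc) 0

def total_client_error_alt (client_list : List (List String)) : List Int :=
  let errors := client_list.flatMap (fun ch => ch)
  ([[1, 2], [3], [4, 5]] : List (List Int)).map (fun lens => pvBucketSum errors lens)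

-- ===== PRECONDITION & SPEC =====
def Spec_total_client_error (client_list : List (List String)) (out : List Int) : Prop := out = total_client_error_alt client_list
instance (client_list : List (List String)) (out : List Int) : Decidable (Spec_total_client_error client_list out) := by unfold Spec_total_client_error; infer_instance

-- ===== CLAIM (what is proved, stated in full; the proofs are below) =====
def Claim_equal_total_client_error : Prop := ∀ (client_list : List (List String)), Dom_total_client_error client_list → Spec_total_client_error client_list (total_client_error client_list)

-- ===== LEMMAS AND PROOFS =====

-- count of elements of split-length k among a list of errors
def pvCnt (k : Int) (es : List String) : Int := (es.countP (fun e => pvSplitLenA e = k) : Int)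

theorem pvCnt_cons (k : Int) (e : String) (es : List String) :
    pvCnt k (e :: es) = (if pvSplitLenA e = k then 1 else 0) + pvCnt k es := by
  simp [pvCnt, List.countP_cons]
  split_ifs <;> omega

-- invariant of A's inner loop
theorem pvInner (es : List String) (a b c : Int) :
    es.foldl pvStepA [a, b, c] =
      [a + pvCnt 1 es + pvCnt 2 es, b + pvCnt 3 es, c + pvCnt 4 es + pvCnt 5 es] := by
  induction es generalizing a b c with
  | nil => simp [pvCnt]
  | cons e es ih =>
    simp only [List.foldl_cons]
    have hc : ∀ k, pvCnt k (e :: es) = (if pvSplitLenA e = k then 1 else 0) + pvCnt k es :=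
      fun k => pvCnt_cons k e es
    by_cases h12 : pvSplitLenA e = 1 ∨ pvSplitLenA e = 2
    · have : pvStepA [a, b, c] e = [a + 1, b, c] := by
        simp [pvStepA, h12, List.set]
      rw [this, ih]
      simp only [hc]
      rcases h12 with h | h <;> simp [h] <;> omega
    · by_cases h3 : pvSplitLenA e = 3
      · have : pvStepA [a, b, c] e = [a, b + 1, c] := by
          simp [pvStepA, h3, List.set]
        rw [this, ih]
        simp only [hc]
        have h1 : ¬ pvSplitLenA e = 1 := by intro h; exact h12 (Or.inl h)
        have h2 : ¬ pvSplitLenA e = 2 := by intro h; exact h12 (Or.inr h)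
        simp [h3]
        omega
      · by_cases h45 : pvSplitLenA e = 4 ∨ pvSplitLenA e = 5
        · have : pvStepA [a, b, c] e = [a, b, c + 1] := by
            simp [pvStepA, h12, h3, h45, List.set]
          rw [this, ih]
          simp only [hc]
          have h1 : ¬ pvSplitLenA e = 1 := by intro h; exact h12 (Or.inl h)
          have h2 : ¬ pvSplitLenA e = 2 := by intro h; exact h12 (Or.inr h)
          rcases h45 with h | h <;> simp [h] <;> omega
        · have : pvStepA [a, b, c] e = [a, b, c] := by
            simp [pvStepA, h12, h3, h45]
          rw [this, ih]
          have h1 : ¬ pvSplitLenA e = 1 := by intro h; exact h12 (Or.inl h)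
          have h2 : ¬ pvSplitLenA e = 2 := by intro h; exact h12 (Or.inr h)
          have h4 : ¬ pvSplitLenA e = 4 := by intro h; exact h45 (Or.inl h)
          have h5 : ¬ pvSplitLenA e = 5 := by intro h; exact h45 (Or.inr h)
          simp [h1, h2, h3, h4, h5, hc]

theorem pvCnt_append (k : Int) (xs ys : List String) :
    pvCnt k (xs ++ ys) = pvCnt k xs + pvCnt k ys := by
  simp [pvCnt, List.countP_append]

-- A computes the three bucket totals of the flattened error list
theorem pvA_closed (cl : List (List String)) :
    total_client_error cl =
      [pvCnt 1 (cl.flatMap id) + pvCnt 2 (cl.flatMap id),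
       pvCnt 3 (cl.flatMap id),
       pvCnt 4 (cl.flatMap id) + pvCnt 5 (cl.flatMap id)] := by
  unfold total_client_error
  induction cl using List.reverseRecOn with
  | nil => simp [pvCnt]
  | append_singleton cl ch ih =>
    rw [List.foldl_append]
    simp only [List.foldl_cons, List.foldl_nil]
    rw [ih, pvInner]
    simp only [List.flatMap_append, pvCnt_append, List.flatMap_cons, List.flatMap_nil,
      List.append_nil, List.cons.injEq, and_true, id_eq]
    exact ⟨by omega, trivial, by omega⟩

-- B's counting pass is a countP over the error list
theorem pvBucketSum_foldl (es : List String) (a : Int) (lens : List Int) :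
    es.foldl (fun acc e => if pvSplitLenB e ∈ lens then acc + 1 else acc) a
      = a + (es.countP (fun e => pvSplitLenB e ∈ lens) : Int) := by
  induction es generalizing a with
  | nil => simp
  | cons e es ih =>
    simp only [List.foldl_cons]
    rw [ih, List.countP_cons]
    simp only [decide_eq_true_eq]
    split_ifs with h <;> push_cast <;> omega

theorem pvBucket_pair (es : List String) (j k : Int) (hjk : j ≠ k) :
    pvBucketSum es [j, k] = pvCnt j es + pvCnt k es := by
  have hBA : pvSplitLenB = pvSplitLenA := rfl
  rw [pvBucketSum, pvBucketSum_foldl, hBA]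
  induction es with
  | nil => simp [pvCnt]
  | cons e es ih =>
    rw [List.countP_cons, pvCnt_cons, pvCnt_cons]
    by_cases hj : pvSplitLenA e = j <;> by_cases hk : pvSplitLenA e = k
    · exact absurd (hj.symm.trans hk) hjk
    all_goals
      simp only [List.mem_cons, List.not_mem_nil, or_false, hj, hk] at *
    all_goals push_cast at ih ⊢
    all_goals simp at ih ⊢
    all_goals omega

theorem pvBucket_single (es : List String) (k : Int) :
    pvBucketSum es [k] = pvCnt k es := by
  have hBA : pvSplitLenB = pvSplitLenA := rfl
  rw [pvBucketSum, pvBucketSum_foldl, hBA, pvCnt]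
  simp

-- ===== VERDICT (by name: the statement is the Claim_ definition above) =====
theorem total_client_error_spec : Claim_equal_total_client_error := by
  intro cl _
  unfold Spec_total_client_error total_client_error_alt
  rw [pvA_closed]
  have hfl : cl.flatMap (fun ch => ch) = cl.flatMap id := rfl
  simp only [List.map_cons, List.map_nil, hfl,
    pvBucket_pair _ 1 2 (by norm_num), pvBucket_single,
    pvBucket_pair _ 4 5 (by norm_num)]
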